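-- pv_equiv track=rewrite | github.com/Merwanel/advent_of_code_2025 | day_4/sol.py | findRemovable_mat
-- ===== SOURCE A (Python) =====
-- def isCellAccessible(mat, r, c) :
--     if mat[r][c] == "." :
--         return True
--     N, M = len(mat), len(mat[0])
--     cpt_paper_around = 0
--     if r - 1 >= 0 and mat[r-1][c] == "@" :  # top
--         cpt_paper_around += 1
--     if r - 1 >= 0 and c - 1 >= 0 and mat[r-1][c-1] == "@" :  # top-left
--         cpt_paper_around += 1
--     if c - 1 >= 0 and mat[r][c-1] == "@" :  # left
--         cpt_paper_around += 1
--     if r + 1 < N and c - 1 >= 0 and mat[r+1][c-1] == "@" :  # bottom-left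
--         cpt_paper_around += 1
--     if r + 1 < N and mat[r+1][c] == "@" :  # bottom
--         cpt_paper_around += 1
--     if r + 1 < N and c + 1 < M and mat[r+1][c+1] == "@" :  # bottom-right
--         cpt_paper_around += 1
--     if c + 1 < M and mat[r][c+1] == "@" :  # right
--         cpt_paper_around += 1
--     if  r - 1 >= 0 and c + 1 < M and mat[r-1][c+1] == "@" :  # top-right
--         cpt_paper_around += 1
--     return cpt_paper_around < 4
--
-- def findRemovable_mat(mat) :
--     new_mat = [list(r) for r in mat]
--     N, M = len(mat), len(mat[0])
--     for r in range(N) :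
--         for c in range(M) :
--             if mat[r][c] != "@" :
--                 continue
--             if isCellAccessible(mat, r, c)  :
--                 new_mat[r][c] = 'X'
--     return new_mat
-- ===== SOURCE B (Python) =====
-- def findRemovable_mat(mat):
--     N, M = len(mat), len(mat[0])
--
--     def ind(r, c):
--         return 1 if 0 <= r < N and 0 <= c < M and mat[r][c] == "@" else 0
--
--     def make_row(r):
--         # vertical 3-cell sums for this row, one per column
--         v = [ind(r - 1, c) + ind(r, c) + ind(r + 1, c) for c in range(M)]
--         return ["X" if c < M and ch == "@" and
--                 (v[c - 1] if c - 1 >= 0 else 0) + v[c] + (v[c + 1] if c + 1 < M else 0) - 1 < 4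
--                 else ch
--                 for c, ch in enumerate(mat[r])]
--
--     return [make_row(r) for r in range(N)]
-- ===== Notes on version B (the rewrite author's own statement) =====
-- stated objective: alternative
-- what changed: Replaces the per-cell eight guarded neighbor branches with a separable box filter: one pass builds per-row vertical 3-cell column sums, a second pass combines three adjacent column sums and subtracts the center to get the neighbor count.
import Mathlib
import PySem

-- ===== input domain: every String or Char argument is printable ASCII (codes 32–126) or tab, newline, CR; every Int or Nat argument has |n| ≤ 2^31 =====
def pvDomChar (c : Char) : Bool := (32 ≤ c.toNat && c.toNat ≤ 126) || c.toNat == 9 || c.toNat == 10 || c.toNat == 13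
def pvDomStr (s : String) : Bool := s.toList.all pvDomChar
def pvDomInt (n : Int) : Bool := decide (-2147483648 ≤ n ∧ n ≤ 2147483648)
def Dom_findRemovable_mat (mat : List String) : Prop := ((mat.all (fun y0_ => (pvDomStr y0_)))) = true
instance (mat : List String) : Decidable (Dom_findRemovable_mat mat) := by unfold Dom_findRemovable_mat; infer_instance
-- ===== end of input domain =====

-- B replaces A's per-cell eight guarded neighbor branches by a separable box filter
-- (per-row vertical 3-cell column sums, then a horizontal 3-window sum minus the center);
-- objective: alternative decomposition, same asymptotic cost. Equality of RETURN values.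

-- ===== PORT A =====
-- mat[r][c] as a Char; default '\x00' only where Python would raise IndexError (excluded by Pre_)
def cellCh (mat : List String) (r c : Int) : Char :=
  match PySem.List.pyGet? mat r with
  | some row => (PySem.Str.pyGet? row c).getD '\x00'
  | none => '\x00'

def isCellAccessible (mat : List String) (r c : Int) : Bool :=
  if cellCh mat r c = '.' then true
  else
    let N : Int := mat.length
    let M : Int := ((PySem.List.pyGet? mat 0).getD "").toList.length
    let cpt : Int := 0
    let cpt := if r - 1 ≥ 0 ∧ cellCh mat (r-1) c = '@' then cpt + 1 else cpt       -- top
    let cpt := if r - 1 ≥ 0 ∧ c - 1 ≥ 0 ∧ cellCh mat (r-1) (c-1) = '@' then cpt + 1 else cpt  -- top-left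
    let cpt := if c - 1 ≥ 0 ∧ cellCh mat r (c-1) = '@' then cpt + 1 else cpt       -- left
    let cpt := if r + 1 < N ∧ c - 1 ≥ 0 ∧ cellCh mat (r+1) (c-1) = '@' then cpt + 1 else cpt  -- bottom-left
    let cpt := if r + 1 < N ∧ cellCh mat (r+1) c = '@' then cpt + 1 else cpt       -- bottom
    let cpt := if r + 1 < N ∧ c + 1 < M ∧ cellCh mat (r+1) (c+1) = '@' then cpt + 1 else cpt  -- bottom-right
    let cpt := if c + 1 < M ∧ cellCh mat r (c+1) = '@' then cpt + 1 else cpt       -- right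
    let cpt := if r - 1 ≥ 0 ∧ c + 1 < M ∧ cellCh mat (r-1) (c+1) = '@' then cpt + 1 else cpt  -- top-right
    decide (cpt < 4)

def findRemovable_mat (mat : List String) : List (List String) :=
  let new_mat := mat.map (fun r => r.toList.map (fun ch => String.ofList [ch]))
  let N := mat.length
  let M := ((PySem.List.pyGet? mat 0).getD "").toList.length
  (List.range N).foldl (fun nm (r : Nat) =>
    (List.range M).foldl (fun nm (c : Nat) =>
      if cellCh mat (r : Int) (c : Int) ≠ '@' then nm
      else if isCellAccessible mat (r : Int) (c : Int) then
        PySem.List.pySetD nm (r : Int)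
          (PySem.List.pySetD (PySem.List.pyGetD nm (r : Int) []) (c : Int) "X")
      else nm) nm) new_mat

-- ===== PORT B =====
def indB (mat : List String) (N M : Int) (r c : Int) : Int :=
  if 0 ≤ r ∧ r < N ∧ 0 ≤ c ∧ c < M ∧ cellCh mat r c = '@' then 1 else 0

def findRemovable_mat_alt (mat : List String) : List (List String) :=
  let N : Int := mat.length
  let M : Int := ((PySem.List.pyGet? mat 0).getD "").toList.length
  (List.range mat.length).map (fun (r : Nat) =>
    let v : List Int := (List.range M.toNat).map (fun (c : Nat) =>
      indB mat N M ((r : Int) - 1) (c : Int) + indB mat N M (r : Int) (c : Int) + indB mat N M ((r : Int) + 1) (c : Int))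
    (PySem.List.enumerate ((PySem.List.pyGet? mat (r : Int)).getD "").toList).map (fun p =>
      if p.1 < M ∧ p.2 = '@' ∧
          (if p.1 - 1 ≥ 0 then PySem.List.pyGetD v (p.1 - 1) 0 else 0)
            + PySem.List.pyGetD v p.1 0
            + (if p.1 + 1 < M then PySem.List.pyGetD v (p.1 + 1) 0 else 0) - 1 < 4
      then "X" else String.ofList [p.2]))

-- ===== PRECONDITION & SPEC =====
-- Pre_ excludes exactly the inputs where Python A raises IndexError: the empty grid
-- (mat[0]) and grids where some row is shorter than the first row (mat[r][c], c < M).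
def Pre_findRemovable_mat (mat : List String) : Prop :=
  mat ≠ [] ∧ ∀ s ∈ mat, ((mat.headD "").toList.length) ≤ s.toList.length
instance (mat : List String) : Decidable (Pre_findRemovable_mat mat) := by
  unfold Pre_findRemovable_mat; infer_instance
def pvWitness_findRemovable_mat : List String := ["@@.", "@@@", ".@@"]

def Spec_findRemovable_mat (mat : List String) (out : List (List String)) : Prop := out = findRemovable_mat_alt mat
instance (mat : List String) (out : List (List String)) : Decidable (Spec_findRemovable_mat mat out) := by unfold Spec_findRemovable_mat; infer_instance

-- ===== CLAIM (what is proved, stated in full; the proofs are below) =====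
def Claim_equal_findRemovable_mat : Prop := ∀ (mat : List String), Dom_findRemovable_mat mat → Pre_findRemovable_mat mat → Spec_findRemovable_mat mat (findRemovable_mat mat)

-- ===== LEMMAS AND PROOFS =====

-- width of the grid, as both ports compute it
def pvM (mat : List String) : Nat := ((PySem.List.pyGet? mat 0).getD "").toList.length

-- the A-side neighbor count (the let-chain of isCellAccessible, as a value)
def cnt8 (mat : List String) (N M r c : Int) : Int :=
  let cpt : Int := 0
  let cpt := if r - 1 ≥ 0 ∧ cellCh mat (r-1) c = '@' then cpt + 1 else cpt
  let cpt := if r - 1 ≥ 0 ∧ c - 1 ≥ 0 ∧ cellCh mat (r-1) (c-1) = '@' then cpt + 1 else cpt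
  let cpt := if c - 1 ≥ 0 ∧ cellCh mat r (c-1) = '@' then cpt + 1 else cpt
  let cpt := if r + 1 < N ∧ c - 1 ≥ 0 ∧ cellCh mat (r+1) (c-1) = '@' then cpt + 1 else cpt
  let cpt := if r + 1 < N ∧ cellCh mat (r+1) c = '@' then cpt + 1 else cpt
  let cpt := if r + 1 < N ∧ c + 1 < M ∧ cellCh mat (r+1) (c+1) = '@' then cpt + 1 else cpt
  let cpt := if c + 1 < M ∧ cellCh mat r (c+1) = '@' then cpt + 1 else cpt
  let cpt := if r - 1 ≥ 0 ∧ c + 1 < M ∧ cellCh mat (r-1) (c+1) = '@' then cpt + 1 else cpt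
  cpt

lemma accessible_eq (mat : List String) (r c : Int) (h : cellCh mat r c ≠ '.') :
    isCellAccessible mat r c =
      decide (cnt8 mat (mat.length : Int) (pvM mat : Int) r c < 4) := by
  simp only [isCellAccessible, cnt8, pvM]
  rw [if_neg h]
  rfl

lemma pvIteAdd (p : Prop) [Decidable p] (x : Int) :
    (if p then x + 1 else x) = x + (if p then (1:Int) else 0) := by
  split_ifs <;> ring

lemma cnt8_eq_sum (mat : List String) (N M r c : Int) :
    cnt8 mat N M r c =
      (if r - 1 ≥ 0 ∧ cellCh mat (r-1) c = '@' then (1:Int) else 0)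
      + (if r - 1 ≥ 0 ∧ c - 1 ≥ 0 ∧ cellCh mat (r-1) (c-1) = '@' then 1 else 0)
      + (if c - 1 ≥ 0 ∧ cellCh mat r (c-1) = '@' then 1 else 0)
      + (if r + 1 < N ∧ c - 1 ≥ 0 ∧ cellCh mat (r+1) (c-1) = '@' then 1 else 0)
      + (if r + 1 < N ∧ cellCh mat (r+1) c = '@' then 1 else 0)
      + (if r + 1 < N ∧ c + 1 < M ∧ cellCh mat (r+1) (c+1) = '@' then 1 else 0)
      + (if c + 1 < M ∧ cellCh mat r (c+1) = '@' then 1 else 0)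
      + (if r - 1 ≥ 0 ∧ c + 1 < M ∧ cellCh mat (r-1) (c+1) = '@' then 1 else 0) := by
  simp only [cnt8, pvIteAdd]
  ring

lemma branch_eq (mat : List String) (N M i j : Int) (g : Prop) [Decidable g]
    (hg : g ↔ 0 ≤ i ∧ i < N ∧ 0 ≤ j ∧ j < M ∧ cellCh mat i j = '@') :
    (if g then (1:Int) else 0) = indB mat N M i j := by
  unfold indB
  split_ifs with h1 h2 h3
  · rfl
  · exact absurd (hg.mp h1) h2
  · exact absurd (hg.mpr h3) h1
  · rfl

lemma indB_zero_lo (mat : List String) (N M r : Int) {c : Int} (h : c < 0) :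
    indB mat N M r c = 0 := by
  unfold indB; rw [if_neg]; rintro ⟨-, -, h2, -, -⟩; omega

lemma indB_zero_hi (mat : List String) (N M r : Int) {c : Int} (h : M ≤ c) :
    indB mat N M r c = 0 := by
  unfold indB; rw [if_neg]; rintro ⟨-, -, -, h3, -⟩; omega

lemma count_eq (mat : List String) (N M r c : Int)
    (hr0 : 0 ≤ r) (hrN : r < N) (hc0 : 0 ≤ c) (hcM : c < M)
    (hat : cellCh mat r c = '@') :
    (if c - 1 ≥ 0 then indB mat N M (r-1) (c-1) + indB mat N M r (c-1) + indB mat N M (r+1) (c-1) else 0)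
      + (indB mat N M (r-1) c + indB mat N M r c + indB mat N M (r+1) c)
      + (if c + 1 < M then indB mat N M (r-1) (c+1) + indB mat N M r (c+1) + indB mat N M (r+1) (c+1) else 0)
      - 1
    = cnt8 mat N M r c := by
  have e1 : (if c - 1 ≥ 0 then indB mat N M (r-1) (c-1) + indB mat N M r (c-1) + indB mat N M (r+1) (c-1) else 0)
      = indB mat N M (r-1) (c-1) + indB mat N M r (c-1) + indB mat N M (r+1) (c-1) := by
    split_ifs with h
    · rfl
    · rw [indB_zero_lo mat N M _ (by omega), indB_zero_lo mat N M _ (by omega),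
        indB_zero_lo mat N M _ (by omega)]
      ring
  have e3 : (if c + 1 < M then indB mat N M (r-1) (c+1) + indB mat N M r (c+1) + indB mat N M (r+1) (c+1) else 0)
      = indB mat N M (r-1) (c+1) + indB mat N M r (c+1) + indB mat N M (r+1) (c+1) := by
    split_ifs with h
    · rfl
    · rw [indB_zero_hi mat N M _ (by omega), indB_zero_hi mat N M _ (by omega),
        indB_zero_hi mat N M _ (by omega)]
      ring
  have emid : indB mat N M r c = 1 := if_pos ⟨hr0, hrN, hc0, hcM, hat⟩
  rw [e1, e3, emid, cnt8_eq_sum]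
  rw [branch_eq mat N M (r-1) c _ (by
    constructor
    · rintro ⟨h1, h2⟩; exact ⟨h1, by omega, hc0, hcM, h2⟩
    · rintro ⟨h1, -, -, -, h5⟩; exact ⟨h1, h5⟩)]
  rw [branch_eq mat N M (r-1) (c-1) _ (by
    constructor
    · rintro ⟨h1, h2, h3⟩; exact ⟨h1, by omega, h2, by omega, h3⟩
    · rintro ⟨h1, -, h3, -, h5⟩; exact ⟨h1, h3, h5⟩)]
  rw [branch_eq mat N M r (c-1) _ (by
    constructor
    · rintro ⟨h1, h2⟩; exact ⟨hr0, hrN, h1, by omega, h2⟩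
    · rintro ⟨-, -, h3, -, h5⟩; exact ⟨h3, h5⟩)]
  rw [branch_eq mat N M (r+1) (c-1) _ (by
    constructor
    · rintro ⟨h1, h2, h3⟩; exact ⟨by omega, h1, h2, by omega, h3⟩
    · rintro ⟨-, h2, h3, -, h5⟩; exact ⟨h2, h3, h5⟩)]
  rw [branch_eq mat N M (r+1) c _ (by
    constructor
    · rintro ⟨h1, h2⟩; exact ⟨by omega, h1, hc0, hcM, h2⟩
    · rintro ⟨-, h2, -, -, h5⟩; exact ⟨h2, h5⟩)]
  rw [branch_eq mat N M (r+1) (c+1) _ (by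
    constructor
    · rintro ⟨h1, h2, h3⟩; exact ⟨by omega, h1, by omega, h2, h3⟩
    · rintro ⟨-, h2, -, h4, h5⟩; exact ⟨h2, h4, h5⟩)]
  rw [branch_eq mat N M r (c+1) _ (by
    constructor
    · rintro ⟨h1, h2⟩; exact ⟨hr0, hrN, by omega, h1, h2⟩
    · rintro ⟨-, -, -, h4, h5⟩; exact ⟨h4, h5⟩)]
  rw [branch_eq mat N M (r-1) (c+1) _ (by
    constructor
    · rintro ⟨h1, h2, h3⟩; exact ⟨h1, by omega, by omega, h2, h3⟩
    · rintro ⟨h1, -, -, h4, h5⟩; exact ⟨h1, h4, h5⟩)]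
  ring

lemma cellCh_eq (mat : List String) (r c : Nat) :
    cellCh mat (r : Int) (c : Int) = (((mat[r]?.getD "").toList)[c]?).getD '\x00' := by
  unfold cellCh
  rw [PySem.List.pyGet?_natCast]
  cases h : mat[r]? <;> simp

-- the body of A's inner loop, named (definitionally the lambda in the port)
def stepCell (mat : List String) (r : Nat) (nm : List (List String)) (c : Nat) : List (List String) :=
  if cellCh mat (r : Int) (c : Int) ≠ '@' then nm
  else if isCellAccessible mat (r : Int) (c : Int) then
    PySem.List.pySetD nm (r : Int)
      (PySem.List.pySetD (PySem.List.pyGetD nm (r : Int) []) (c : Int) "X")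
  else nm

-- the same step, acting on the single row it touches
def stepRow (mat : List String) (r : Nat) (row : List String) (c : Nat) : List String :=
  if cellCh mat (r : Int) (c : Int) ≠ '@' then row
  else if isCellAccessible mat (r : Int) (c : Int) then row.set c "X" else row

lemma stepCell_getElem?_ne (mat : List String) (r : Nat) (nm : List (List String)) (c r' : Nat)
    (h : r' ≠ r) : (stepCell mat r nm c)[r']? = nm[r']? := by
  unfold stepCell
  split_ifs <;> simp [List.getElem?_set_ne (Ne.symm h)]

lemma stepCell_getElem?_self (mat : List String) (r : Nat) (nm : List (List String)) (c : Nat) :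
    (stepCell mat r nm c)[r]? = nm[r]?.map (fun row => stepRow mat r row c) := by
  unfold stepCell stepRow
  split_ifs with h1 h2
  · cases nm[r]? <;> simp
  · simp only [PySem.List.pySetD_natCast, PySem.List.pyGetD_natCast]
    cases h : nm[r]? with
    | none =>
      have hlen : nm.length ≤ r := by
        by_contra hc
        exact absurd h (by simp [List.getElem?_eq_getElem (by omega : r < nm.length)])
      rw [List.set_eq_of_length_le hlen, h]
      rfl
    | some row =>
      have hr : r < nm.length := (List.getElem?_eq_some_iff.mp h).1
      rw [List.getElem?_set_self hr, List.getD_eq_getElem?_getD, h]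
      rfl
  · cases nm[r]? <;> simp

lemma foldl_stepCell_ne (mat : List String) (r : Nat) (l : List Nat) :
    ∀ (nm : List (List String)) (r' : Nat), r' ≠ r →
      ((l.foldl (stepCell mat r) nm))[r']? = nm[r']? := by
  induction l with
  | nil => intro nm r' _; rfl
  | cons a l ih =>
    intro nm r' h
    rw [List.foldl_cons, ih _ _ h, stepCell_getElem?_ne _ _ _ _ _ h]

lemma foldl_stepCell_self (mat : List String) (r : Nat) (l : List Nat) :
    ∀ (nm : List (List String)),
      ((l.foldl (stepCell mat r) nm))[r]? =
        nm[r]?.map (fun row => l.foldl (stepRow mat r) row) := by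
  induction l with
  | nil => intro nm; cases h : nm[r]? <;> simp [h]
  | cons a l ih =>
    intro nm
    rw [List.foldl_cons, ih, stepCell_getElem?_self]
    cases nm[r]? <;> simp

lemma length_foldl_stepRow (mat : List String) (r : Nat) (l : List Nat) :
    ∀ (row : List String), (l.foldl (stepRow mat r) row).length = row.length := by
  induction l with
  | nil => intro row; rfl
  | cons a l ih =>
    intro row
    rw [List.foldl_cons, ih]
    unfold stepRow
    split_ifs <;> simp

lemma stepRow_getElem?_ne (mat : List String) (r : Nat) (row : List String) (m c : Nat)
    (h : c ≠ m) : (stepRow mat r row m)[c]? = row[c]? := by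
  unfold stepRow
  split_ifs <;> simp [List.getElem?_set_ne (by omega : m ≠ c)]

lemma stepRow_getElem?_self (mat : List String) (r : Nat) (row : List String) (m : Nat) :
    (stepRow mat r row m)[m]? =
      if cellCh mat (r : Int) (m : Int) = '@' ∧ isCellAccessible mat (r : Int) (m : Int) = true then
        (if m < row.length then some "X" else none)
      else row[m]? := by
  unfold stepRow
  by_cases h1 : cellCh mat (r : Int) (m : Int) = '@'
  · rw [if_neg (not_not_intro h1)]
    by_cases h2 : isCellAccessible mat (r : Int) (m : Int) = true
    · rw [if_pos h2, if_pos ⟨h1, h2⟩]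
      by_cases h3 : m < row.length
      · rw [List.getElem?_set_self h3, if_pos h3]
      · rw [List.set_eq_of_length_le (by omega), if_neg h3,
          List.getElem?_eq_none_iff.mpr (by omega)]
    · rw [if_neg h2, if_neg (fun h => h2 h.2)]
  · rw [if_pos h1, if_neg (fun h => h1 h.1)]

lemma foldl_stepRow_getElem? (mat : List String) (r : Nat) (m : Nat) (row : List String) (c : Nat) :
    ((List.range m).foldl (stepRow mat r) row)[c]? =
      if c < m ∧ cellCh mat (r : Int) (c : Int) = '@' ∧ isCellAccessible mat (r : Int) (c : Int) = true then
        (if c < row.length then some "X" else none)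
      else row[c]? := by
  induction m with
  | zero => simp
  | succ m ih =>
    rw [List.range_succ, List.foldl_append, List.foldl_cons, List.foldl_nil]
    by_cases hcm : c = m
    · subst hcm
      rw [stepRow_getElem?_self, length_foldl_stepRow, ih,
        if_neg (by rintro ⟨h, -⟩; omega : ¬ (c < c ∧ cellCh mat (r : Int) (c : Int) = '@' ∧ isCellAccessible mat (r : Int) (c : Int) = true))]
      by_cases hcond : cellCh mat (r : Int) (c : Int) = '@' ∧ isCellAccessible mat (r : Int) (c : Int) = true
      · have hc3 : c < c + 1 ∧ cellCh mat (r : Int) (c : Int) = '@' ∧ isCellAccessible mat (r : Int) (c : Int) = true :=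
          ⟨Nat.lt_succ_self c, hcond⟩
        rw [if_pos hcond, if_pos hc3]
      · have hc3 : ¬ (c < c + 1 ∧ cellCh mat (r : Int) (c : Int) = '@' ∧ isCellAccessible mat (r : Int) (c : Int) = true) :=
          fun h => hcond h.2
        rw [if_neg hcond, if_neg hc3]
    · rw [stepRow_getElem?_ne mat r _ m c hcm, ih]
      simp only [show (c < m + 1) ↔ (c < m) from by omega]

lemma foldl_outer_getElem? (mat : List String) (Mn : Nat) (n : Nat) (nm : List (List String)) (r' : Nat) :
    ((List.range n).foldl (fun nm r => (List.range Mn).foldl (stepCell mat r) nm) nm)[r']? =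
      if r' < n then nm[r']?.map (fun row => (List.range Mn).foldl (stepRow mat r') row)
      else nm[r']? := by
  induction n with
  | zero => simp
  | succ n ih =>
    rw [List.range_succ, List.foldl_append, List.foldl_cons, List.foldl_nil]
    by_cases h : r' = n
    · subst h
      rw [foldl_stepCell_self, ih, if_neg (by omega), if_pos (by omega)]
    · rw [foldl_stepCell_ne mat n (List.range Mn) _ r' h, ih]
      by_cases hlt : r' < n
      · rw [if_pos hlt, if_pos (by omega)]
      · rw [if_neg hlt, if_neg (by omega)]

-- the common specification both ports are proved equal to
def specMat (mat : List String) : List (List String) :=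
  (List.range mat.length).map (fun (r : Nat) =>
    (List.range ((mat[r]?.getD "").toList.length)).map (fun (c : Nat) =>
      if (c : Int) < (pvM mat : Int) ∧ cellCh mat (r : Int) (c : Int) = '@' ∧
          cnt8 mat (mat.length : Int) (pvM mat : Int) (r : Int) (c : Int) < 4
      then "X" else String.ofList [cellCh mat (r : Int) (c : Int)]))

lemma pvM_eq_headD (mat : List String) : pvM mat = (mat.headD "").toList.length := by
  cases mat <;> simp [pvM, PySem.List.pyGet?, PySem.List.pyIdx?]

lemma cellCh_at (mat : List String) (r c : Nat) (hr : r < mat.length)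
    (hc : c < (mat[r]).toList.length) :
    cellCh mat (r : Int) (c : Int) = (mat[r]).toList[c] := by
  rw [cellCh_eq, List.getElem?_eq_getElem hr]
  simp [List.getElem?_eq_getElem hc]

lemma row_eq (mat : List String) (hpre : Pre_findRemovable_mat mat) (r : Nat) (hr : r < mat.length) :
    (List.range (pvM mat)).foldl (stepRow mat r) ((mat[r]).toList.map (fun ch => String.ofList [ch]))
      = (List.range ((mat[r]?.getD "").toList.length)).map (fun (c : Nat) =>
          if (c : Int) < (pvM mat : Int) ∧ cellCh mat (r : Int) (c : Int) = '@' ∧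
              cnt8 mat (mat.length : Int) (pvM mat : Int) (r : Int) (c : Int) < 4
          then "X" else String.ofList [cellCh mat (r : Int) (c : Int)]) := by
  have hms : pvM mat ≤ (mat[r]).toList.length := by
    rw [pvM_eq_headD]
    exact hpre.2 (mat[r]) (List.getElem_mem hr)
  have hget : mat[r]?.getD "" = mat[r] := by rw [List.getElem?_eq_getElem hr]; rfl
  apply List.ext_getElem?
  intro c
  rw [foldl_stepRow_getElem?]
  simp only [List.getElem?_map, List.length_map, hget]
  by_cases hc : c < (mat[r]).toList.length
  · have hcell : cellCh mat (r : Int) (c : Int) = (mat[r]).toList[c] := cellCh_at mat r c hr hc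
    simp only [if_pos hc, List.getElem?_eq_getElem hc, List.getElem?_range hc, Option.map_some]
    by_cases hcond : c < pvM mat ∧ cellCh mat (r : Int) (c : Int) = '@' ∧ isCellAccessible mat (r : Int) (c : Int) = true
    · have hacc := hcond.2.2
      rw [accessible_eq mat (r : Int) (c : Int) (by rw [hcond.2.1]; decide)] at hacc
      have hcnt : cnt8 mat (mat.length : Int) (pvM mat : Int) (r : Int) (c : Int) < 4 :=
        of_decide_eq_true hacc
      rw [if_pos hcond, if_pos (⟨by exact_mod_cast hcond.1, hcond.2.1, hcnt⟩ :
        (c : Int) < (pvM mat : Int) ∧ cellCh mat (r : Int) (c : Int) = '@' ∧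
          cnt8 mat (mat.length : Int) (pvM mat : Int) (r : Int) (c : Int) < 4)]
    · have hcond' : ¬ ((c : Int) < (pvM mat : Int) ∧ cellCh mat (r : Int) (c : Int) = '@' ∧
          cnt8 mat (mat.length : Int) (pvM mat : Int) (r : Int) (c : Int) < 4) := by
        rintro ⟨a, b, d⟩
        refine hcond ⟨by exact_mod_cast a, b, ?_⟩
        rw [accessible_eq mat (r : Int) (c : Int) (by rw [b]; decide)]
        exact decide_eq_true d
      rw [if_neg hcond, if_neg hcond']
      simp [hcell]
  · rw [List.getElem?_eq_none_iff.mpr (by omega),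
      List.getElem?_eq_none_iff.mpr (by rw [List.length_range]; omega)]
    rw [if_neg (by rintro ⟨a, -⟩; omega : ¬ (c < pvM mat ∧ cellCh mat (r : Int) (c : Int) = '@' ∧ isCellAccessible mat (r : Int) (c : Int) = true))]
    rfl

lemma A_eq_spec (mat : List String) (hpre : Pre_findRemovable_mat mat) :
    findRemovable_mat mat = specMat mat := by
  have hA : findRemovable_mat mat = (List.range mat.length).foldl
      (fun nm r => (List.range (pvM mat)).foldl (stepCell mat r) nm)
      (mat.map (fun s => s.toList.map (fun ch => String.ofList [ch]))) := by
    unfold findRemovable_mat stepCell pvM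
    rfl
  apply List.ext_getElem?
  intro r'
  rw [hA, foldl_outer_getElem?]
  unfold specMat
  rw [List.getElem?_map, List.getElem?_map]
  by_cases hr : r' < mat.length
  · rw [if_pos hr, List.getElem?_range hr, List.getElem?_eq_getElem hr]
    simp only [Option.map_some]
    rw [row_eq mat hpre r' hr]
  · rw [if_neg hr, List.getElem?_eq_none_iff.mpr (by omega),
      List.getElem?_eq_none_iff.mpr (by rw [List.length_range]; omega)]
    rfl

lemma enumerate_getElem? {α : Type} (cs : List α) :
    ∀ (s : Int) (k : Nat),
      (PySem.List.enumerate cs s)[k]? = cs[k]?.map (fun ch => (s + (k : Int), ch)) := by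
  induction cs with
  | nil => intro s k; simp [PySem.List.enumerate]
  | cons x xs ih =>
    intro s k
    rw [PySem.List.enumerate_cons]
    cases k with
    | zero => simp
    | succ k =>
      rw [List.getElem?_cons_succ, List.getElem?_cons_succ, ih (s + 1) k]
      cases h : xs[k]? <;> simp
      omega

lemma B_eq_spec (mat : List String) : findRemovable_mat_alt mat = specMat mat := by
  simp only [findRemovable_mat_alt, specMat]
  have hMM : ((PySem.List.pyGet? mat 0).getD "").toList.length = pvM mat := rfl
  rw [hMM]
  refine List.map_congr_left ?_
  intro r hrmem
  have hr : r < mat.length := List.mem_range.mp hrmem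
  have hcs : ((PySem.List.pyGet? mat (r : Int)).getD "").toList = (mat[r]).toList := by
    rw [PySem.List.pyGet?_natCast, List.getElem?_eq_getElem hr]
    rfl
  rw [hcs]
  apply List.ext_getElem?
  intro c
  rw [List.getElem?_map, List.getElem?_map, enumerate_getElem?]
  have hget : mat[r]?.getD "" = mat[r] := by rw [List.getElem?_eq_getElem hr]; rfl
  rw [hget]
  by_cases hc : c < (mat[r]).toList.length
  · rw [List.getElem?_eq_getElem hc, List.getElem?_range hc]
    simp only [Option.map_some, zero_add]
    have hcell : cellCh mat (r : Int) (c : Int) = (mat[r]).toList[c] := cellCh_at mat r c hr hc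
    have hwin : ∀ (hcM : (c : Int) < (pvM mat : Int)), (mat[r]).toList[c] = '@' →
        (if (c : Int) - 1 ≥ 0 then
            PySem.List.pyGetD ((List.range (pvM mat : Int).toNat).map (fun (cc : Nat) =>
              indB mat (mat.length : Int) (pvM mat : Int) ((r : Int) - 1) (cc : Int)
                + indB mat (mat.length : Int) (pvM mat : Int) (r : Int) (cc : Int)
                + indB mat (mat.length : Int) (pvM mat : Int) ((r : Int) + 1) (cc : Int))) ((c : Int) - 1) 0
          else 0)
          + PySem.List.pyGetD ((List.range (pvM mat : Int).toNat).map (fun (cc : Nat) =>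
              indB mat (mat.length : Int) (pvM mat : Int) ((r : Int) - 1) (cc : Int)
                + indB mat (mat.length : Int) (pvM mat : Int) (r : Int) (cc : Int)
                + indB mat (mat.length : Int) (pvM mat : Int) ((r : Int) + 1) (cc : Int))) (c : Int) 0
          + (if (c : Int) + 1 < (pvM mat : Int) then
            PySem.List.pyGetD ((List.range (pvM mat : Int).toNat).map (fun (cc : Nat) =>
              indB mat (mat.length : Int) (pvM mat : Int) ((r : Int) - 1) (cc : Int)
                + indB mat (mat.length : Int) (pvM mat : Int) (r : Int) (cc : Int)
                + indB mat (mat.length : Int) (pvM mat : Int) ((r : Int) + 1) (cc : Int))) ((c : Int) + 1) 0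
          else 0) - 1
        = cnt8 mat (mat.length : Int) (pvM mat : Int) (r : Int) (c : Int) := by
      intro hcM hat
      have hat' : cellCh mat (r : Int) (c : Int) = '@' := by rw [hcell]; exact hat
      have hv : ∀ (j : Int), 0 ≤ j → j < (pvM mat : Int) →
          PySem.List.pyGetD ((List.range (pvM mat : Int).toNat).map (fun (cc : Nat) =>
            indB mat (mat.length : Int) (pvM mat : Int) ((r : Int) - 1) (cc : Int)
              + indB mat (mat.length : Int) (pvM mat : Int) (r : Int) (cc : Int)
              + indB mat (mat.length : Int) (pvM mat : Int) ((r : Int) + 1) (cc : Int))) j 0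
          = indB mat (mat.length : Int) (pvM mat : Int) ((r : Int) - 1) j
            + indB mat (mat.length : Int) (pvM mat : Int) (r : Int) j
            + indB mat (mat.length : Int) (pvM mat : Int) ((r : Int) + 1) j := by
        intro j hj0 hjM
        rw [PySem.List.pyGetD_eq_getElem _ _ hj0
          (by rw [List.length_map, List.length_range]; omega)]
        rw [List.getElem_map, List.getElem_range, Int.toNat_of_nonneg hj0]
      have e1 : (if (c : Int) - 1 ≥ 0 then
          PySem.List.pyGetD ((List.range (pvM mat : Int).toNat).map (fun (cc : Nat) =>
            indB mat (mat.length : Int) (pvM mat : Int) ((r : Int) - 1) (cc : Int)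
              + indB mat (mat.length : Int) (pvM mat : Int) (r : Int) (cc : Int)
              + indB mat (mat.length : Int) (pvM mat : Int) ((r : Int) + 1) (cc : Int))) ((c : Int) - 1) 0
        else 0)
          = (if (c : Int) - 1 ≥ 0 then
            indB mat (mat.length : Int) (pvM mat : Int) ((r : Int) - 1) ((c : Int) - 1)
              + indB mat (mat.length : Int) (pvM mat : Int) (r : Int) ((c : Int) - 1)
              + indB mat (mat.length : Int) (pvM mat : Int) ((r : Int) + 1) ((c : Int) - 1)
          else 0) := by
        split_ifs with h
        · exact hv _ h (by omega)
        · rfl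
      have e3 : (if (c : Int) + 1 < (pvM mat : Int) then
          PySem.List.pyGetD ((List.range (pvM mat : Int).toNat).map (fun (cc : Nat) =>
            indB mat (mat.length : Int) (pvM mat : Int) ((r : Int) - 1) (cc : Int)
              + indB mat (mat.length : Int) (pvM mat : Int) (r : Int) (cc : Int)
              + indB mat (mat.length : Int) (pvM mat : Int) ((r : Int) + 1) (cc : Int))) ((c : Int) + 1) 0
        else 0)
          = (if (c : Int) + 1 < (pvM mat : Int) then
            indB mat (mat.length : Int) (pvM mat : Int) ((r : Int) - 1) ((c : Int) + 1)
              + indB mat (mat.length : Int) (pvM mat : Int) (r : Int) ((c : Int) + 1)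
              + indB mat (mat.length : Int) (pvM mat : Int) ((r : Int) + 1) ((c : Int) + 1)
          else 0) := by
        split_ifs with h
        · exact hv _ (by omega) h
        · rfl
      rw [e1, e3, hv (c : Int) (by omega) hcM]
      exact count_eq mat (mat.length : Int) (pvM mat : Int) (r : Int) (c : Int)
        (by omega) (by exact_mod_cast hr) (by omega) hcM hat'
    refine congrArg some (if_congr ?_ rfl (congrArg (fun ch => String.ofList [ch]) hcell.symm))
    constructor
    · rintro ⟨a, b, d⟩
      exact ⟨a, by rw [hcell]; exact b, (hwin a b) ▸ d⟩
    · rintro ⟨a, b, d⟩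
      have b' : (mat[r]).toList[c] = '@' := by rw [← hcell]; exact b
      exact ⟨a, b', by rw [hwin a b']; exact d⟩
  · rw [List.getElem?_eq_none_iff.mpr (by omega),
      List.getElem?_eq_none_iff.mpr (by rw [List.length_range]; omega)]
    rfl

-- ===== VERDICT (by name: the statement is the Claim_ definition above) =====
theorem findRemovable_mat_spec : Claim_equal_findRemovable_mat := by
  intro mat _ hpre
  unfold Spec_findRemovable_mat
  rw [A_eq_spec mat hpre, B_eq_spec]
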